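-- pv_equiv track=rewrite | github.com/federalbyro/Diploma | helpers/batching.py | group_by_code
-- ===== SOURCE A (Python) =====
-- def group_by_code(
--     batch_idx: list[int],
--     selected_codes: list[str],
--     codes: list[str],
-- ) -> dict[str, list[int]]:
--     """
--     Группирует индексы батча по языковому коду.
--     Нужно потому что NLLB не может мешать языки в одном батче.
--
--     Возвращает:
--         {"zho_Hans": [0, 3], "zho_Hant": [1, 2]}
--     """
--     grouped: dict[str, list[int]] = {code: [] for code in codes}
--     for i in batch_idx:
--         code = selected_codes[i]
--         if code in grouped:
--             grouped[code].append(i)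
--     return grouped
-- ===== SOURCE B (Python) =====
-- def group_by_code(
--     batch_idx: list[int],
--     selected_codes: list[str],
--     codes: list[str],
-- ) -> dict[str, list[int]]:
--     # One nested comprehension: for each code, scan batch_idx for its indices.
--     return {
--         code: [i for i in batch_idx if selected_codes[i] == code]
--         for code in codes
--     }
-- ===== Notes on version B (the rewrite author's own statement) =====
-- stated objective: simpler
-- what changed: B replaces A's init-then-dispatch pass (pre-seed every code with [], then scan batch_idx once routing each index into its bucket with a membership guard) by a single nested dict comprehension that, for each code, rescans batch_idx collecting the indices whose selected code equals it.
import Mathlib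
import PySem

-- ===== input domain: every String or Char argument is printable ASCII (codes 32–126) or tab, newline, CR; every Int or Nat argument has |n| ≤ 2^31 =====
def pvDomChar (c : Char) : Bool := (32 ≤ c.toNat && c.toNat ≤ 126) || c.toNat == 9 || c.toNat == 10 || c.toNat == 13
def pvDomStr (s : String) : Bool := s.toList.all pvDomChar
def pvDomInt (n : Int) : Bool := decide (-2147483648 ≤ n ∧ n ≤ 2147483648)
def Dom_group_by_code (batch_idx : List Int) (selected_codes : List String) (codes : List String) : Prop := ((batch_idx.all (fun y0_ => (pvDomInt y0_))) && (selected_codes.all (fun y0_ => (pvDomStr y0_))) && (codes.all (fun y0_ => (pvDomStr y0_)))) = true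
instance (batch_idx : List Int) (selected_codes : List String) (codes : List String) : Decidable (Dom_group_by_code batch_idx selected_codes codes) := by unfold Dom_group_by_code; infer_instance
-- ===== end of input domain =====

-- B replaces A's seed-then-dispatch pass by one nested per-code rescan of batch_idx (simpler, not faster).

-- ===== PORT A =====
-- A: grouped = {code: [] for code in codes}; for i in batch_idx: code = selected_codes[i];
--    if code in grouped: grouped[code].append(i).  selected_codes[i] can raise IndexError → Pre_.
def group_by_code (batch_idx : List Int) (selected_codes : List String) (codes : List String) : List (String × List Int) :=
  let grouped : PySem.Dict String (List Int) :=
    codes.foldl (fun d code => d.insert code []) PySem.Dict.empty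
  let grouped :=
    batch_idx.foldl (fun d i =>
      match PySem.List.pyGet? selected_codes i with
      | some code => if d.contains code then d.modify code [] (fun l => l ++ [i]) else d
      | none => d)   -- IndexError in the Python; excluded by Pre_
      grouped
  grouped.items

-- ===== PORT B =====
-- B: {code: [i for i in batch_idx if selected_codes[i] == code] for code in codes}
def group_by_code_alt (batch_idx : List Int) (selected_codes : List String) (codes : List String) : List (String × List Int) :=
  (codes.foldl (fun d code =>
      d.insert code (batch_idx.filter (fun i => PySem.List.pyGet? selected_codes i == some code)))
    PySem.Dict.empty).items

-- ===== PRECONDITION & SPEC =====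
-- Pre_: every index of batch_idx is a valid (possibly negative) Python index into selected_codes;
-- outside it A raises IndexError.
def Pre_group_by_code (batch_idx : List Int) (selected_codes : List String) (codes : List String) : Prop :=
  ∀ i ∈ batch_idx, PySem.Raise.InRange selected_codes.length i
instance (batch_idx : List Int) (selected_codes : List String) (codes : List String) : Decidable (Pre_group_by_code batch_idx selected_codes codes) := by unfold Pre_group_by_code; infer_instance

def pvWitness_group_by_code : List Int × List String × List String :=
  ([0, 2, -1, 1], ["zho_Hans", "eng_Latn", "zho_Hans"], ["zho_Hans", "zho_Hant"])


def Spec_group_by_code (batch_idx : List Int) (selected_codes : List String) (codes : List String) (out : List (String × List Int)) : Prop := out = group_by_code_alt batch_idx selected_codes codes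
instance (batch_idx : List Int) (selected_codes : List String) (codes : List String) (out : List (String × List Int)) : Decidable (Spec_group_by_code batch_idx selected_codes codes out) := by unfold Spec_group_by_code; infer_instance

-- ===== CLAIM (what is proved, stated in full; the proofs are below) =====
def Claim_equal_group_by_code : Prop := ∀ (batch_idx : List Int) (selected_codes : List String) (codes : List String), Dom_group_by_code batch_idx selected_codes codes → Pre_group_by_code batch_idx selected_codes codes → Spec_group_by_code batch_idx selected_codes codes (group_by_code batch_idx selected_codes codes)

-- ===== LEMMAS AND PROOFS =====

-- value of B's comprehension dict at a key: last insert at k wins, and its value depends only on k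
theorem getD_foldl_insert_fun {ν : Type} (codes : List String) (f : String → ν)
    (d : PySem.Dict String ν) (k : String) (dflt : ν) :
    (codes.foldl (fun d c => d.insert c (f c)) d).getD k dflt
      = if k ∈ codes then f k else d.getD k dflt := by
  induction codes generalizing d with
  | nil => simp
  | cons c cs ih =>
    simp only [List.foldl_cons, ih, PySem.Dict.getD_insert, List.mem_cons]
    by_cases hcs : k ∈ cs <;> by_cases hkc : k = c <;> simp [hcs, hkc]

-- A's dispatch loop appends to the bucket of k exactly the indices whose selected code is k
theorem loopA_getD (sel : List String) (l : List Int) (d : PySem.Dict String (List Int))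
    (k : String) (hk : d.contains k = true) :
    (l.foldl (fun d i =>
      match PySem.List.pyGet? sel i with
      | some code => if d.contains code then d.modify code [] (fun l => l ++ [i]) else d
      | none => d) d).getD k []
    = d.getD k [] ++ l.filter (fun i => PySem.List.pyGet? sel i == some k) := by
  induction l generalizing d with
  | nil => simp
  | cons i l ih =>
    simp only [List.foldl_cons, List.filter_cons]
    cases hg : PySem.List.pyGet? sel i with
    | none => simp [ih d hk]
    | some code =>
      by_cases hc : d.contains code = true
      · simp only [hc, if_true]
        rw [ih _ (by simp [PySem.Dict.contains_modify, hk])]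
        by_cases hkc : code = k
        · subst hkc
          simp [PySem.Dict.getD_modify_self]
        · have : k ≠ code := Ne.symm hkc
          simp [PySem.Dict.getD_modify, this, hkc, beq_iff_eq]
      · have hck : code ≠ k := fun h => hc (h ▸ hk)
        simp only [Bool.not_eq_true] at hc
        simp [hc, ih d hk, hck, beq_iff_eq]

-- A's dispatch loop does not change the key list
theorem loopA_keys (sel : List String) (l : List Int) (d : PySem.Dict String (List Int)) :
    (l.foldl (fun d i =>
      match PySem.List.pyGet? sel i with
      | some code => if d.contains code then d.modify code [] (fun l => l ++ [i]) else d
      | none => d) d).keys = d.keys := by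
  induction l generalizing d with
  | nil => rfl
  | cons i l ih =>
    simp only [List.foldl_cons]
    cases hg : PySem.List.pyGet? sel i with
    | none => exact ih d
    | some code =>
      by_cases hc : d.contains code = true
      · simp [hc, ih, PySem.Dict.keys_modify, PySem.Dict.keys_insert_of_contains]
      · simp only [Bool.not_eq_true] at hc
        simp [hc, ih d]

-- ===== VERDICT (by name: the statement is the Claim_ definition above) =====
theorem group_by_code_spec : Claim_equal_group_by_code := by
  intro batch_idx selected_codes codes _ _
  unfold Spec_group_by_code group_by_code group_by_code_alt
  set f : String → List Int :=
    fun code => batch_idx.filter (fun i => PySem.List.pyGet? selected_codes i == some code) with hf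
  have hkeys0 : (codes.foldl (fun d code => d.insert code ([] : List Int)) PySem.Dict.empty).keys
      = PySem.Set.ofList codes := by
    rw [PySem.Dict.keys_foldl_insert]
    simp [PySem.Set.update_nil_left]
  have hkeysB : (codes.foldl (fun d code => d.insert code (f code)) PySem.Dict.empty).keys
      = PySem.Set.ofList codes := by
    rw [PySem.Dict.keys_foldl_insert]
    simp [PySem.Set.update_nil_left]
  have hndA := PySem.Dict.nodup_keys_foldl_insert (d := (PySem.Dict.empty : PySem.Dict String (List Int)))
      (l := codes) (f := fun _ _ => ([] : List Int)) (by simp [PySem.Dict.keys_empty])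
  have hndB := PySem.Dict.nodup_keys_foldl_insert (d := (PySem.Dict.empty : PySem.Dict String (List Int)))
      (l := codes) (f := fun _ c => f c) (by simp [PySem.Dict.keys_empty])
  set d0 := codes.foldl (fun d code => d.insert code ([] : List Int)) PySem.Dict.empty with hd0
  set dA := batch_idx.foldl (fun d i =>
      match PySem.List.pyGet? selected_codes i with
      | some code => if d.contains code then d.modify code [] (fun l => l ++ [i]) else d
      | none => d) d0 with hdA
  set dB := codes.foldl (fun d code => d.insert code (f code)) PySem.Dict.empty with hdB
  have hkA : dA.keys = PySem.Set.ofList codes := by rw [hdA, loopA_keys, hkeys0]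
  have hndA' : dA.keys.Nodup := by rw [hkA]; exact hkeys0 ▸ hndA
  have hndB' : dB.keys.Nodup := hndB
  rw [PySem.Dict.items_eq_map_keys dA hndA' [], PySem.Dict.items_eq_map_keys dB hndB' [],
    hkA, hkeysB]
  apply List.map_congr_left
  intro k hk
  have hkcodes : k ∈ codes := (PySem.Set.mem_ofList _ _).1 hk
  have hcont : d0.contains k = true := by
    exact (PySem.Dict.contains_iff_mem_keys _ _).2 (by rw [hkeys0]; exact hk)
  have ha : dA.getD k [] = d0.getD k [] ++ f k := by
    rw [hdA]; exact loopA_getD selected_codes batch_idx d0 k hcont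
  have h0 : d0.getD k [] = [] := by
    rw [hd0, getD_foldl_insert_fun codes (fun _ => ([] : List Int))]
    simp [hkcodes]
  have hb : dB.getD k [] = f k := by
    rw [hdB, getD_foldl_insert_fun codes f]
    simp [hkcodes]
  rw [ha, h0, hb]
  simp
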